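-- pv_equiv track=rewrite | github.com/keechow/ProNumNum2020 | 4D_num.py | check_double_double
-- ===== SOURCE A (Python) =====
-- def check_double_double(str_num):
--     check_digit = ['0', '1', '2', '3', '4', '5', '6', '7', '8', '9']
--     for each in check_digit:
--         count = str_num.count(each)
--         if count == 2:
--             for num in check_digit:
--                 count2 = str_num.count(num)
--                 if count2 == 2 and num != each:
--                     return True
--     return False
-- ===== SOURCE B (Python) =====
-- def check_double_double(str_num):
--     freq = {}
--     for ch in str_num:
--         freq[ch] = freq.get(ch, 0) + 1
--     twice = sum(1 for d in '0123456789' if freq.get(d, 0) == 2)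
--     return twice >= 2
-- ===== Notes on version B (the rewrite author's own statement) =====
-- stated objective: simpler
-- what changed: Replaced A's nested double loop of repeated str.count scans by a single frequency-dict build over the string followed by one flat pass counting digits whose frequency is exactly 2, returning that tally >= 2.
import Mathlib
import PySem

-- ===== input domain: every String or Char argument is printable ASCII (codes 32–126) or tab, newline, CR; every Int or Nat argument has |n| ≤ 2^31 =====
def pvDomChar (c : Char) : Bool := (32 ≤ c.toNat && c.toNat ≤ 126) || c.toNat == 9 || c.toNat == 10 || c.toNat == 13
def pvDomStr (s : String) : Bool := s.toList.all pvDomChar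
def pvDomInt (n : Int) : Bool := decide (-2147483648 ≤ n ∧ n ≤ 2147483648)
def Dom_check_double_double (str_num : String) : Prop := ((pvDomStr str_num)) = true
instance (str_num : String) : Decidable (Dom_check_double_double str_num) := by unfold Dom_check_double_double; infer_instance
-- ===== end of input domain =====

-- B replaces A's nested per-digit rescans by one frequency-dict build plus a single pass counting digits that occur exactly twice (objective: simpler).

-- ===== PORT A =====
-- inner 'for num in check_digit: ... return True' loop of A
def pvA_inner (str_num : String) (each : String) : List String → Bool
  | [] => false
  | num :: rest =>
    let count2 := PySem.Str.count str_num num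
    if count2 == 2 && num != each then true else pvA_inner str_num each rest

-- outer 'for each in check_digit' loop of A (second argument is check_digit, passed to the inner loop)
def pvA_outer (str_num : String) (check_digit : List String) : List String → Bool
  | [] => false
  | each :: rest =>
    let count := PySem.Str.count str_num each
    if count == 2 then
      if pvA_inner str_num each check_digit then true else pvA_outer str_num check_digit rest
    else pvA_outer str_num check_digit rest

def check_double_double (str_num : String) : Bool :=
  let check_digit : List String := ["0", "1", "2", "3", "4", "5", "6", "7", "8", "9"]
  pvA_outer str_num check_digit check_digit

-- ===== PORT B =====
def check_double_double_alt (str_num : String) : Bool :=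
  let freq : PySem.Dict Char Int :=
    str_num.toList.foldl (fun d ch => d.insert ch (d.getD ch 0 + 1)) PySem.Dict.empty
  let twice : Int :=
    ("0123456789".toList).foldl (fun acc d => if freq.getD d 0 == 2 then acc + 1 else acc) 0
  decide (2 ≤ twice)

-- ===== PRECONDITION & SPEC =====
def Spec_check_double_double (str_num : String) (out : Bool) : Prop := out = check_double_double_alt str_num
instance (str_num : String) (out : Bool) : Decidable (Spec_check_double_double str_num out) := by unfold Spec_check_double_double; infer_instance

-- ===== CLAIM (what is proved, stated in full; the proofs are below) =====
def Claim_equal_check_double_double : Prop := ∀ (str_num : String), Dom_check_double_double str_num → Spec_check_double_double str_num (check_double_double str_num)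

-- ===== LEMMAS AND PROOFS =====


theorem pv_count_go_singleton (c : Char) :
    ∀ (l : List Char) (fuel acc : ℕ), l.length ≤ fuel →
      PySem.Chars.count.go [c] fuel l acc = acc + l.count c := by
  intro l
  induction l with
  | nil => intro fuel acc _; cases fuel <;> simp [PySem.Chars.count.go]
  | cons h t ih =>
    intro fuel acc hle
    cases fuel with
    | zero => simp at hle
    | succ f =>
      simp only [List.length_cons, Nat.succ_le_succ_iff] at hle
      rw [PySem.Chars.count.go]
      by_cases hc : c = h
      · subst hc
        simp only [List.isPrefixOf, Bool.and_true, beq_self_eq_true,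
          if_true, List.length_cons, List.length_nil, List.drop_succ_cons, List.drop_zero]
        rw [ih f (acc + 1) hle]
        simp
        omega
      · have hb : (c == h) = false := by simp [hc]
        simp only [List.isPrefixOf, Bool.and_true, hb]
        rw [ih f acc hle]
        simp [Ne.symm hc]

theorem pv_chars_count_singleton (cs : List Char) (c : Char) :
    PySem.Chars.count cs [c] = cs.count c := by
  rw [PySem.Chars.count]
  simp [pv_count_go_singleton c cs cs.length 0 le_rfl]

theorem pv_beq_intCast (n : ℕ) : (((n : Int)) == (2 : Int)) = (n == 2) := by
  by_cases h : n = 2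
  · subst h; simp
  · have h2 : (n : Int) ≠ 2 := by exact_mod_cast h
    simp [h, h2]

theorem pv_inner_any (s each : String) : ∀ (l : List String),
    pvA_inner s each l = l.any (fun num => PySem.Str.count s num == 2 && num != each) := by
  intro l
  induction l with
  | nil => rfl
  | cons num rest ih =>
    simp only [pvA_inner, List.any_cons, ← ih]
    split <;> simp_all [beq_iff_eq]

theorem pv_outer_any (s : String) (cd : List String) : ∀ (l : List String),
    pvA_outer s cd l = l.any (fun each => (PySem.Str.count s each == 2) && pvA_inner s each cd) := by
  intro l
  induction l with
  | nil => rfl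
  | cons each rest ih =>
    simp only [pvA_outer, List.any_cons, ← ih]
    split <;> (try split) <;> simp_all [beq_iff_eq]

theorem pv_any_two {α : Type} [DecidableEq α] [BEq α] [LawfulBEq α]
    (l : List α) (hl : l.Nodup) (p : α → Bool) :
    (l.any (fun x => p x && l.any (fun y => p y && y != x))) = decide (2 ≤ l.countP p) := by
  rw [Bool.eq_iff_iff]
  simp only [List.any_eq_true, Bool.and_eq_true, bne_iff_ne, ne_eq, decide_eq_true_eq]
  constructor
  · rintro ⟨x, hx, hpx, y, hy, hpy, hyx⟩
    have hxf : x ∈ l.filter p := List.mem_filter.2 ⟨hx, hpx⟩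
    have hyf : y ∈ l.filter p := List.mem_filter.2 ⟨hy, hpy⟩
    have hye : y ∈ (l.filter p).erase x := (List.mem_erase_of_ne hyx).2 hyf
    have h1 : ((l.filter p).erase x).length = (l.filter p).length - 1 :=
      List.length_erase_of_mem hxf
    have h2 : 1 ≤ ((l.filter p).erase x).length := List.length_pos_of_mem hye
    have h3 : 1 ≤ (l.filter p).length := List.length_pos_of_mem hxf
    rw [List.countP_eq_length_filter]
    omega
  · intro h2
    rw [List.countP_eq_length_filter] at h2
    rcases hfl : l.filter p with _ | ⟨a, tl⟩
    · rw [hfl] at h2; simp at h2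
    · rcases tl with _ | ⟨b, tl2⟩
      · rw [hfl] at h2; simp at h2
      · have ha : a ∈ l.filter p := by rw [hfl]; exact List.mem_cons_self
        have hb : b ∈ l.filter p := by rw [hfl]; simp
        have hnd : (l.filter p).Nodup := hl.filter p
        have hab : a ≠ b := by
          rw [hfl] at hnd
          intro h; exact (List.nodup_cons.1 hnd).1 (h ▸ List.mem_cons_self)
        exact ⟨a, (List.mem_filter.1 ha).1, (List.mem_filter.1 ha).2,
               b, (List.mem_filter.1 hb).1, (List.mem_filter.1 hb).2, Ne.symm hab⟩

set_option maxHeartbeats 1000000 in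
theorem pv_main (s : String) : check_double_double s = check_double_double_alt s := by
  have hnd : (["0","1","2","3","4","5","6","7","8","9"] : List String).Nodup := by decide
  have hA : check_double_double s =
      decide (2 ≤ (["0","1","2","3","4","5","6","7","8","9"] : List String).countP
        (fun each => PySem.Str.count s each == 2)) := by
    rw [check_double_double]
    rw [pv_outer_any]
    calc (["0","1","2","3","4","5","6","7","8","9"] : List String).any
          (fun each => (PySem.Str.count s each == 2) && pvA_inner s each ["0","1","2","3","4","5","6","7","8","9"])
        = (["0","1","2","3","4","5","6","7","8","9"] : List String).any
          (fun each => (PySem.Str.count s each == 2) &&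
            (["0","1","2","3","4","5","6","7","8","9"] : List String).any
              (fun num => PySem.Str.count s num == 2 && num != each)) := by
          simp only [pv_inner_any]
      _ = _ := pv_any_two _ hnd _
  have hB : check_double_double_alt s =
      decide (2 ≤ (['0','1','2','3','4','5','6','7','8','9'] : List Char).countP
        (fun d => s.toList.count d == 2)) := by
    rw [check_double_double_alt]
    have hds : ("0123456789":String).toList = ['0','1','2','3','4','5','6','7','8','9'] := rfl
    simp only [hds, PySem.List.foldl_if_add_one, zero_add]
    simp only [PySem.Dict.getD_foldl_insert_add_one, PySem.Dict.getD_empty, zero_add, pv_beq_intCast]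
    congr 1
    exact propext (by exact_mod_cast Iff.rfl)
  rw [hA, hB]
  have e0 : (PySem.Str.count s "0" == 2) = (s.toList.count '0' == 2) := by
    rw [PySem.Str.count_eq]; rw [show ("0":String).toList = ['0'] from rfl, pv_chars_count_singleton]
  have e1 : (PySem.Str.count s "1" == 2) = (s.toList.count '1' == 2) := by
    rw [PySem.Str.count_eq]; rw [show ("1":String).toList = ['1'] from rfl, pv_chars_count_singleton]
  have e2 : (PySem.Str.count s "2" == 2) = (s.toList.count '2' == 2) := by
    rw [PySem.Str.count_eq]; rw [show ("2":String).toList = ['2'] from rfl, pv_chars_count_singleton]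
  have e3 : (PySem.Str.count s "3" == 2) = (s.toList.count '3' == 2) := by
    rw [PySem.Str.count_eq]; rw [show ("3":String).toList = ['3'] from rfl, pv_chars_count_singleton]
  have e4 : (PySem.Str.count s "4" == 2) = (s.toList.count '4' == 2) := by
    rw [PySem.Str.count_eq]; rw [show ("4":String).toList = ['4'] from rfl, pv_chars_count_singleton]
  have e5 : (PySem.Str.count s "5" == 2) = (s.toList.count '5' == 2) := by
    rw [PySem.Str.count_eq]; rw [show ("5":String).toList = ['5'] from rfl, pv_chars_count_singleton]
  have e6 : (PySem.Str.count s "6" == 2) = (s.toList.count '6' == 2) := by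
    rw [PySem.Str.count_eq]; rw [show ("6":String).toList = ['6'] from rfl, pv_chars_count_singleton]
  have e7 : (PySem.Str.count s "7" == 2) = (s.toList.count '7' == 2) := by
    rw [PySem.Str.count_eq]; rw [show ("7":String).toList = ['7'] from rfl, pv_chars_count_singleton]
  have e8 : (PySem.Str.count s "8" == 2) = (s.toList.count '8' == 2) := by
    rw [PySem.Str.count_eq]; rw [show ("8":String).toList = ['8'] from rfl, pv_chars_count_singleton]
  have e9 : (PySem.Str.count s "9" == 2) = (s.toList.count '9' == 2) := by
    rw [PySem.Str.count_eq]; rw [show ("9":String).toList = ['9'] from rfl, pv_chars_count_singleton]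
  have hc : (["0","1","2","3","4","5","6","7","8","9"] : List String).countP
      (fun each => PySem.Str.count s each == 2) =
      (['0','1','2','3','4','5','6','7','8','9'] : List Char).countP
      (fun d => s.toList.count d == 2) := by
    simp only [List.countP_cons, List.countP_nil, e0, e1, e2, e3, e4, e5, e6, e7, e8, e9]
  rw [hc]

-- ===== VERDICT (by name: the statement is the Claim_ definition above) =====
theorem check_double_double_spec : Claim_equal_check_double_double := by
  intro s _
  show check_double_double s = check_double_double_alt s
  exact pv_main s
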